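-- pv_equiv track=rewrite | github.com/nl77-seraph/MMF | generate_unseen_cross_queries.py | split_into_zones
-- ===== SOURCE A (Python) =====
-- from typing import Dict, List, Tuple
--
-- def split_into_zones(num_classes: int, num_tabs: int) -> Dict[int, List[int]]:
--     """与 disjoint 生成逻辑一致的均匀分区。"""
--     classes_per_zone = num_classes // num_tabs
--     remainder = num_classes % num_tabs
--     zones: Dict[int, List[int]] = {}
--     current = 0
--     for zone_id in range(num_tabs):
--         zone_size = classes_per_zone + (1 if zone_id < remainder else 0)
--         zones[zone_id] = list(range(current, current + zone_size))
--         current += zone_size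
--     return zones
-- ===== SOURCE B (Python) =====
-- def split_into_zones(num_classes: int, num_tabs: int):
--     """Closed-form zones: each zone's bounds computed directly from its index."""
--     base = num_classes // num_tabs
--     rem = num_classes % num_tabs
--     return {
--         z: list(range(z * base + min(z, rem),
--                       z * base + min(z, rem) + base + (1 if z < rem else 0)))
--         for z in range(num_tabs)
--     }
-- ===== Notes on version B (the rewrite author's own statement) =====
-- stated objective: alternative
-- what changed: Replaces the loop that threads a mutable running offset through a dict with a single dict comprehension in which each zone's start is computed in closed form (z*base + min(z, rem)) independently of the other zones.
import Mathlib
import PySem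

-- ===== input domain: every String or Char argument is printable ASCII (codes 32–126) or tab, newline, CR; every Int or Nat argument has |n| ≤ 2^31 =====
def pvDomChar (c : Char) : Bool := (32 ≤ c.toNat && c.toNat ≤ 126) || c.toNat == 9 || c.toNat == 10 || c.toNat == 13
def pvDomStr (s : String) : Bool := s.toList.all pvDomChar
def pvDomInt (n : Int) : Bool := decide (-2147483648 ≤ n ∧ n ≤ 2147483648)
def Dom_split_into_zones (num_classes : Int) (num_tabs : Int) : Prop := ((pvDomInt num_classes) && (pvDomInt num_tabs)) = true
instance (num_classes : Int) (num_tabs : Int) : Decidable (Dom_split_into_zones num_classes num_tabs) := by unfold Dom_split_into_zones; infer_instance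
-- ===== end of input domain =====

-- B replaces A's running-offset loop with a dict comprehension whose per-zone bounds
-- are computed in closed form from the zone index (alternative decomposition, same cost).


-- ===== PORT A =====
def split_into_zones (num_classes : Int) (num_tabs : Int) : List (Int × List Int) :=
  let classes_per_zone := PySem.Int.floordiv num_classes num_tabs
  let remainder := PySem.Int.mod num_classes num_tabs
  let st := (PySem.List.pyRange 0 num_tabs 1).foldl
    (fun (st : PySem.Dict Int (List Int) × Int) zone_id =>
      let zone_size := classes_per_zone + (if zone_id < remainder then 1 else 0)
      (st.1.insert zone_id (PySem.List.pyRange st.2 (st.2 + zone_size) 1), st.2 + zone_size))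
    (PySem.Dict.empty, 0)
  st.1.items

-- ===== PORT B =====
def split_into_zones_alt (num_classes : Int) (num_tabs : Int) : List (Int × List Int) :=
  let base := PySem.Int.floordiv num_classes num_tabs
  let rem := PySem.Int.mod num_classes num_tabs
  (PySem.List.pyRange 0 num_tabs 1).map (fun z =>
    (z, PySem.List.pyRange (z * base + min z rem)
          (z * base + min z rem + base + (if z < rem then 1 else 0)) 1))

-- ===== PRECONDITION & SPEC =====
-- num_tabs = 0 makes the Python raise ZeroDivisionError (both A and B).
def Pre_split_into_zones (num_classes : Int) (num_tabs : Int) : Prop := num_tabs ≠ 0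
instance (num_classes : Int) (num_tabs : Int) : Decidable (Pre_split_into_zones num_classes num_tabs) := by unfold Pre_split_into_zones; infer_instance
def pvWitness_split_into_zones : Int × Int := (10, 3)
def Spec_split_into_zones (num_classes : Int) (num_tabs : Int) (out : List (Int × List Int)) : Prop := out = split_into_zones_alt num_classes num_tabs
instance (num_classes : Int) (num_tabs : Int) (out : List (Int × List Int)) : Decidable (Spec_split_into_zones num_classes num_tabs out) := by unfold Spec_split_into_zones; infer_instance

-- ===== CLAIM (what is proved, stated in full; the proofs are below) =====
def Claim_equal_split_into_zones : Prop := ∀ (num_classes : Int) (num_tabs : Int), Dom_split_into_zones num_classes num_tabs → Pre_split_into_zones num_classes num_tabs → Spec_split_into_zones num_classes num_tabs (split_into_zones num_classes num_tabs)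

-- ===== LEMMAS AND PROOFS =====

-- the per-zone closed form B uses
def pvZone (cpz rem z : Int) : Int × List Int :=
  (z, PySem.List.pyRange (z * cpz + min z rem)
        (z * cpz + min z rem + cpz + (if z < rem then 1 else 0)) 1)

lemma pv_start_succ (cpz rem : Int) (z : Int) :
    (z + 1) * cpz + min (z + 1) rem
      = (z * cpz + min z rem) + (cpz + (if z < rem then 1 else 0)) := by
  rcases lt_or_ge z rem with h | h
  · simp only [if_pos h]
    have h1 : min z rem = z := min_eq_left (le_of_lt h)
    have h2 : min (z + 1) rem = z + 1 := min_eq_left (by omega)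
    rw [h1, h2]; ring
  · simp only [if_neg (not_lt.mpr h)]
    have h1 : min z rem = rem := min_eq_right h
    have h2 : min (z + 1) rem = rem := min_eq_right (by omega)
    rw [h1, h2]; ring

lemma pv_loopA (cpz rem : Int) (hrem : 0 ≤ rem) (n : Nat) :
    (List.map (fun (k : Nat) => (0 : Int) + (k : Int)) (List.range n)).foldl
      (fun (st : PySem.Dict Int (List Int) × Int) zone_id =>
        (st.1.insert zone_id
            (PySem.List.pyRange st.2 (st.2 + (cpz + (if zone_id < rem then 1 else 0))) 1),
         st.2 + (cpz + (if zone_id < rem then 1 else 0))))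
      (PySem.Dict.empty, 0)
    = (PySem.Dict.mk (List.map (fun (k : Nat) => pvZone cpz rem ((0 : Int) + (k : Int))) (List.range n)),
       (n : Int) * cpz + min (n : Int) rem) := by
  induction n with
  | zero => simp [PySem.Dict.empty]; omega
  | succ n ih =>
    rw [List.range_succ, List.map_append, List.foldl_append, ih, List.map_append]
    simp only [List.map_cons, List.map_nil, List.foldl_cons, List.foldl_nil, zero_add]
    refine Prod.ext ?_ ?_
    · apply PySem.Dict.ext
      rw [PySem.Dict.items_insert_of_not_contains]
      · congr 1
        simp only [pvZone, add_assoc]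
      · rw [PySem.Dict.contains_mk]
        simp only [List.any_map]
        rw [List.any_eq_false]
        intro k hk
        have hkn := List.mem_range.mp hk
        simp only [Function.comp_apply, pvZone, beq_iff_eq]
        omega
    · show ((n : Int) * cpz + min (n : Int) rem) + _ = _
      push_cast
      rw [← pv_start_succ cpz rem (n : Int)]

theorem split_into_zones_spec : Claim_equal_split_into_zones := by
  intro num_classes num_tabs _ hpre
  unfold Spec_split_into_zones split_into_zones split_into_zones_alt
  simp only []
  by_cases h0 : num_tabs ≤ 0
  · rw [PySem.List.pyRange_one_eq_nil h0]
    rfl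
  · have h : 0 < num_tabs := by omega
    have hrem : 0 ≤ PySem.Int.mod num_classes num_tabs := by
      rw [PySem.Int.mod_eq_emod_of_pos h]
      exact Int.emod_nonneg _ (by omega)
    rw [PySem.List.pyRange_one]
    simp only [sub_zero]
    rw [pv_loopA (PySem.Int.floordiv num_classes num_tabs) (PySem.Int.mod num_classes num_tabs)
        hrem num_tabs.toNat]
    simp only [pvZone, List.map_map, zero_add]
    rfl
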